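-- pv_equiv track=rewrite | github.com/ericka-cespedes/IntroProgrammingPY | 2.py | digitos
-- ===== SOURCE A (Python) =====
-- def digitos(dig, num):
--     if (type(dig)!=int or dig<0 or dig>9) or type(num)!=int:
--         return "Los datos ingresados deben ser números enteros. El dígito debe estar entre 0 y 9."
--     else:
--         A=0
--         B=0
--         i=1
--         t=1
--         while num!=0:
--             if num<0:
--                 num=abs(num)
--             else:
--                 ultimoDigito=num%10
--                 num//=10
--                 if ultimoDigito>dig:
--                     A=A+ultimoDigito*i
--                     i=i*10
--                 else:
--                     B=B+ultimoDigito*t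
--                     t=t*10
--         return A,B
-- ===== SOURCE B (Python) =====
-- def digitos(dig, num):
--     if (type(dig)!=int or dig<0 or dig>9) or type(num)!=int:
--         return "Los datos ingresados deben ser números enteros. El dígito debe estar entre 0 y 9."
--     a = b = 0
--     for ch in str(abs(num)):
--         d = int(ch)
--         if d > dig:
--             a = a * 10 + d
--         else:
--             b = b * 10 + d
--     return a, b
-- ===== Notes on version B (the rewrite author's own statement) =====
-- stated objective: idiomatic
-- what changed: B iterates over the characters of str(abs(num)) most-significant-first with Horner accumulation (a = a*10 + d) into two int buckets, instead of A's least-significant-first modulo/place-value loop with separate place multipliers i and t.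
import Mathlib
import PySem

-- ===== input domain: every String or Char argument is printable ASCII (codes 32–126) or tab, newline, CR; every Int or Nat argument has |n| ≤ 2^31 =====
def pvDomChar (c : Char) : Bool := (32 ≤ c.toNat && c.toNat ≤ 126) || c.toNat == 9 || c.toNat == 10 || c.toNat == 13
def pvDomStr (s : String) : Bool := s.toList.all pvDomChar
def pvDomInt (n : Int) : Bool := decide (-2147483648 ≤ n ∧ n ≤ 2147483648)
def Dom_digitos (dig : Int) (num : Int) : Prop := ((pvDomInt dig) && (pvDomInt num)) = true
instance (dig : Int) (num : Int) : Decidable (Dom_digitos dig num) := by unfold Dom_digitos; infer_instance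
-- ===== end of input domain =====

-- B re-reads the digits most-significant-first from str(abs(num)) with Horner accumulation,
-- instead of A's least-significant-first modulo loop with place multipliers; same cost, more idiomatic.

-- ===== PORT A =====
-- A's while-loop: state (num, A, B, i, t); the num<0 branch replaces num by abs(num).
def digitosLoop (dig : Int) (num : Int) (A : Int) (B : Int) (i : Int) (t : Int) : Int × Int :=
  if num ≠ 0 then
    if num < 0 then
      digitosLoop dig |num| A B i t
    else
      let ultimoDigito := PySem.Int.mod num 10
      let num' := PySem.Int.floordiv num 10
      if ultimoDigito > dig then
        digitosLoop dig num' (A + ultimoDigito * i) B (i * 10) t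
      else
        digitosLoop dig num' A (B + ultimoDigito * t) i (t * 10)
  else (A, B)
termination_by 2 * num.natAbs + (if num < 0 then 1 else 0)
decreasing_by
  · rename_i hne hlt
    rw [abs_of_neg hlt, if_neg (by omega), if_pos hlt]
    omega
  · rename_i hne hnneg _
    have h4 : PySem.Int.floordiv num 10 = num / 10 := by
      simp [PySem.Int.floordiv, Int.fdiv_eq_ediv]
    simp only [h4]
    rw [if_neg (by omega), if_neg hnneg]
    omega
  · rename_i hne hnneg _
    have h4 : PySem.Int.floordiv num 10 = num / 10 := by
      simp [PySem.Int.floordiv, Int.fdiv_eq_ediv]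
    simp only [h4]
    rw [if_neg (by omega), if_neg hnneg]
    omega

def digitos (dig : Int) (num : Int) : Int × Int :=
  -- Python returns an error STRING on this guard (not an Int pair): outside Pre_digitos; junk value here
  if dig < 0 ∨ dig > 9 then (0, 0)
  else digitosLoop dig num 0 0 1 1

-- ===== PORT B =====
def digitos_alt (dig : Int) (num : Int) : Int × Int :=
  -- same Python guard, same error string in Python: outside Pre_digitos; junk value here
  if dig < 0 ∨ dig > 9 then (0, 0)
  else
    -- for ch in str(abs(num)): d = int(ch); Horner into bucket a or b.
    -- int(ch) ported as ch.toNat - 48: exact, every ch of str(abs(num)) is a decimal digit char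
    (PySem.Int.toChars |num|).foldl
      (fun p ch =>
        let d : Int := (ch.toNat : Int) - 48
        if d > dig then (p.1 * 10 + d, p.2) else (p.1, p.2 * 10 + d))
      (0, 0)

-- ===== PRECONDITION & SPEC =====
-- Pre_ excludes dig outside 0..9, where the Python function returns an error string instead of a pair of ints.
def Pre_digitos (dig : Int) (num : Int) : Prop := 0 ≤ dig ∧ dig ≤ 9
instance (dig : Int) (num : Int) : Decidable (Pre_digitos dig num) := by unfold Pre_digitos; infer_instance
def pvWitness_digitos : Int × Int := (3, -472)

def Spec_digitos (dig : Int) (num : Int) (out : Int × Int) : Prop := out = digitos_alt dig num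
instance (dig : Int) (num : Int) (out : Int × Int) : Decidable (Spec_digitos dig num out) := by unfold Spec_digitos; infer_instance

-- ===== CLAIM (what is proved, stated in full; the proofs are below) =====
def Claim_equal_digitos : Prop := ∀ (dig : Int) (num : Int), Dom_digitos dig num → Pre_digitos dig num → Spec_digitos dig num (digitos dig num)

-- ===== LEMMAS AND PROOFS =====

-- value of a least-significant-first list of digits
def pvV : List Int → Int
  | [] => 0
  | d :: ds => d + 10 * pvV ds

-- digits of m, least significant first, as Ints
def pvLsb (m : Nat) : List Int := (Nat.digits 10 m).map (fun (k : Nat) => (k : Int))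

-- most-significant-first digit list underlying str(m) (str(0) = "0")
def pvMsb (m : Nat) : List Nat := if m = 0 then [0] else (Nat.digits 10 m).reverse

theorem pvMod_natCast (m : Nat) : PySem.Int.mod (m : Int) 10 = ((m % 10 : Nat) : Int) := by
  simp [PySem.Int.mod, Int.fmod_eq_emod]

theorem pvFloordiv_natCast (m : Nat) : PySem.Int.floordiv (m : Int) 10 = ((m / 10 : Nat) : Int) := by
  simp [PySem.Int.floordiv, Int.fdiv_eq_ediv]

-- A's loop computes the two bucket values of the LSB-first digit list
theorem digitosLoop_eq (dig : Int) (m : Nat) :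
    ∀ A B i t : Int, digitosLoop dig (m : Int) A B i t =
      (A + i * pvV ((pvLsb m).filter (fun d => decide (dig < d))),
       B + t * pvV ((pvLsb m).filter (fun d => !decide (dig < d)))) := by
  induction m using Nat.strong_induction_on with
  | _ m IH =>
    intro A B i t
    rw [digitosLoop]
    by_cases hm : m = 0
    · subst hm
      simp [pvLsb, pvV]
    · have hne : (m : Int) ≠ 0 := by exact_mod_cast hm
      have hnneg : ¬ ((m : Int) < 0) := by omega
      simp only [hne, hnneg, ne_eq, not_false_eq_true, if_true, if_false, ite_true, ite_false,
        pvMod_natCast, pvFloordiv_natCast]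
      have hdig : Nat.digits 10 m = m % 10 :: Nat.digits 10 (m / 10) :=
        Nat.digits_def' (by norm_num) (Nat.pos_of_ne_zero hm)
      have hlsb : pvLsb m = ((m % 10 : Nat) : Int) :: pvLsb (m / 10) := by
        simp [pvLsb, hdig]
      have hlt : m / 10 < m := Nat.div_lt_self (Nat.pos_of_ne_zero hm) (by norm_num)
      rw [hlsb, List.filter_cons, List.filter_cons]
      by_cases hc : dig < ((m % 10 : Nat) : Int)
      · rw [if_pos hc, IH _ hlt]
        simp only [hc, decide_true, Bool.not_true, Bool.false_eq_true, if_true, if_false,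
          ite_true, ite_false, pvV]
        exact Prod.ext (by push_cast; ring) (by push_cast; ring)
      · rw [if_neg hc, IH _ hlt]
        simp only [hc, decide_false, Bool.not_false, Bool.true_eq_false, if_true, if_false,
          ite_true, ite_false, pvV]
        exact Prod.ext (by push_cast; ring) (by push_cast; ring)

-- toDigitsCore produces the MSB-first digit characters
theorem toDigitsCore_eq (f : Nat) :
    ∀ (n : Nat), n < f → ∀ l : List Char,
      Nat.toDigitsCore 10 f n l = (pvMsb n).map Nat.digitChar ++ l := by
  induction f with
  | zero => intro n h; omega
  | succ f IH =>
    intro n hn l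
    rw [Nat.toDigitsCore]
    by_cases h0 : n / 10 = 0
    · have hlt10 : n < 10 := by omega
      simp only [h0, if_pos]
      by_cases hz : n = 0
      · subst hz; simp [pvMsb]
      · have : Nat.digits 10 n = [n] := by
          rw [Nat.digits_def' (by norm_num) (Nat.pos_of_ne_zero hz)]
          simp [Nat.mod_eq_of_lt hlt10, h0]
        simp [pvMsb, hz, this, Nat.mod_eq_of_lt hlt10]
    · have hge : 10 ≤ n := by
        by_contra h; push_neg at h
        exact h0 (Nat.div_eq_of_lt h)
      have hz : n ≠ 0 := by omega
      simp only [h0, if_neg, if_false]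
      rw [IH (n / 10) (by omega) _]
      have hdig : Nat.digits 10 n = n % 10 :: Nat.digits 10 (n / 10) :=
        Nat.digits_def' (by norm_num) (by omega)
      have : pvMsb n = pvMsb (n / 10) ++ [n % 10] := by
        simp [pvMsb, hz, h0, hdig]
      rw [this]
      simp

theorem toChars_eq (n : Int) (hn : 0 ≤ n) :
    PySem.Int.toChars n = (pvMsb n.toNat).map Nat.digitChar := by
  have : ¬ (n < 0) := by omega
  simp only [PySem.Int.toChars, this, if_false, ite_false]
  rw [Nat.toDigits, toDigitsCore_eq (n.toNat + 1) n.toNat (by omega)]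
  simp

theorem digitChar_int (e : Nat) (h : e < 10) :
    ((Nat.digitChar e).toNat : Int) - 48 = (e : Int) := by
  interval_cases e <;> decide

-- B's fold over the digit characters splits into the two filtered Horner folds
theorem foldB_eq (dig : Int) :
    ∀ (es : List Nat), (∀ e ∈ es, e < 10) → ∀ a b : Int,
      (es.map Nat.digitChar).foldl
        (fun p ch =>
          let d : Int := (ch.toNat : Int) - 48
          if d > dig then (p.1 * 10 + d, p.2) else (p.1, p.2 * 10 + d)) (a, b) =
      ((((es.map (fun (e : Nat) => (e : Int))).filter (fun d => decide (dig < d))).foldl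
          (fun x d => x * 10 + d) a),
       (((es.map (fun (e : Nat) => (e : Int))).filter (fun d => !decide (dig < d))).foldl
          (fun x d => x * 10 + d) b)) := by
  intro es
  induction es with
  | nil => intro _ a b; simp
  | cons e es ih =>
    intro h a b
    have he : e < 10 := h e (List.mem_cons_self ..)
    have hconv := digitChar_int e he
    simp only [List.map_cons, List.foldl_cons, hconv]
    by_cases hc : dig < (e : Int)
    · simp only [hc, gt_iff_lt, if_pos]
      rw [ih (fun x hx => h x (List.mem_cons_of_mem _ hx))]
      simp [List.filter, hc]
    · simp only [gt_iff_lt, hc, if_neg (fun hh => hc hh)]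
      rw [ih (fun x hx => h x (List.mem_cons_of_mem _ hx))]
      simp [List.filter, hc]

-- Horner over the reversed (MSB-first) list equals the LSB place-value sum
theorem horner_reverse (L : List Int) :
    L.reverse.foldl (fun x d => x * 10 + d) 0 = pvV L := by
  induction L with
  | nil => simp [pvV]
  | cons d L ih =>
    simp only [List.reverse_cons, List.foldl_append, List.foldl_cons, List.foldl_nil, ih, pvV]
    ring

theorem digits_lt_ten (m : Nat) : ∀ e ∈ Nat.digits 10 m, e < 10 := fun e he =>
  Nat.digits_lt_base (by norm_num) he

-- ===== VERDICT (by name: the statement is the Claim_ definition above) =====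
theorem digitos_spec : Claim_equal_digitos := by
  intro dig num _ hpre
  obtain ⟨h0, h9⟩ := hpre
  unfold Spec_digitos digitos digitos_alt
  have hguard : ¬ (dig < 0 ∨ dig > 9) := by omega
  simp only [hguard, if_neg, ite_false]
  -- reduce A to the loop on |num|
  have habs : digitosLoop dig num 0 0 1 1 = digitosLoop dig |num| 0 0 1 1 := by
    by_cases hneg : num < 0
    · rw [digitosLoop]
      simp [hneg, show num ≠ 0 by omega]
    · rw [abs_of_nonneg (by omega)]
  rw [habs]
  obtain ⟨m, hcast⟩ : ∃ m : Nat, |num| = (m : Int) := ⟨|num|.toNat, by simp [abs_nonneg]⟩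
  rw [hcast, digitosLoop_eq, toChars_eq _ (by positivity)]
  simp only [Int.toNat_natCast]
  by_cases hz : m = 0
  · subst hz
    rw [show pvMsb 0 = [0] from rfl, foldB_eq dig [0] (by simp)]
    have h00 : decide (dig < (0 : Int)) = false := decide_eq_false (by omega)
    simp [pvLsb, pvV, List.filter, h00]
  · have hmsb : pvMsb m = (Nat.digits 10 m).reverse := by simp [pvMsb, hz]
    rw [hmsb, foldB_eq dig _ (fun e he => digits_lt_ten m e (List.mem_reverse.mp he))]
    rw [List.map_reverse, List.filter_reverse, List.filter_reverse,
        horner_reverse, horner_reverse]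
    simp [pvLsb]
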